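/-
  THE SEGMENTS OF `DGifDecompressInput` (dgif_lib.c:1068-1110, 1067A0H … 10693DH, 105 instructions; contract: Gif/Spec/Lzw.lean): the
  assertions at its cut points, the segment claims, and the COMPOSITION (segments ⇒ the contract), proved here.

      unit                        from      to                                 instructions   calls
      DGifDecompressInput.P       1067A0H   1067EBH                                      16   —
      DGifDecompressInput.1       1067EBH   106807H | 106874H                            11   load8, load4, store4
      DGifDecompressInput.2       106807H   106807H | 10688EH | 106874H                  24   DGifBufferedInput; load4, load8
      DGifDecompressInput.3       10688EH   106874H                                      45   load8, load2, store4, load4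
      DGifDecompressInput.E       106874H   ret                                           9   —

  THE FRAME (Gif/Frames.lean, c/gif/gif_FRAMES.txt): six pushes (r15 r14 r13 r12 rbp rbx) and `sub rsp, 72`: `rsp = RA − 120` in the
  body; the protected frame's base is `RA − 120`, 64 bytes, the object `NextByte` (1 byte) at `base + 32 = RA − 88`; `r14` holds the
  shadow index `(RA − 120) >> 3`, `r13 = gif`, `r15 = Code` from the prologue to the epilogue; `rbx = Private` from 1067F4H on.

  THE FILL LOOP l.1083 `while (CrntShiftState < RunningBits)` contains a contract call: its head 106807H is a cut. MEASURE of a round: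
  `RunningBits − CrntShiftState` (a round adds 8 to `CrntShiftState` and leaves `RunningBits`: at most 2 rounds). THE FUNCTION'S
  measure `mu = 8·rem + 8·Buf[0] + CrntShiftState` does not grow in a round (DGifBufferedInput's success lowers `rem + Buf[0]` by at
  least 1, then `CrntShiftState += 8`), and segment 3 lowers it by `RunningBits ≥ 1`.

  `LZOK.shift` (`CrntShiftState ≤ 11`) does NOT hold at the head after a round (up to 19): the head carries `LZLoop`, which has the
  weaker `CrntShiftState ≤ 11 ∨ CrntShiftState ≤ RunningBits + 7`; both exits re-establish `≤ 11` (the error exit leaves a round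
  that was entered with `CrntShiftState < RunningBits ≤ 12`; segment 3 subtracts `RunningBits ≥ 1`).

  `*Code` IS NOT INSIDE pv: `BufOK` alone admits a `Code` inside pv (`Loose` has the body of pv), where the store `*Code = …` (1068BEH)
  would hit an LZW scalar or `Buf[0]`, and the five stores after it would hit `*Code`. The precondition's `OutPtr.low`
  (`Code + 4 ≤ 800000H`: a STACK object of the caller: DGifDecompressLine passes `&CrntCode` of its protected frame) excludes it.
  Segment 3 reads it off `body.pre`; no other segment needs it.
-/
import Gif.Spec.Lzw
import Gif.LabelsAt
namespace Gif.Spec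
open X86 X86.User Asan ProgX.Base ProgX.Base.Spec

namespace DGifDecompressInput

/-- The active frames inside the body: the function's own protected frame (`base = RA − 120`), innermost. -/
abbrev framesIn (frames : List (Nat × FrameLayout)) (e : State) : List (Nat × FrameLayout) :=
  ((e.reg .rsp).toNat - 120, Gif.Frames.DGifDecompressInput) :: frames

/-- **THE LZW FIELD RANGES INSIDE THE FILL LOOP**: `LZOK` with the clause of `CrntShiftState` weakened to what the loop keeps:
at most 11 (no round made yet), or at most `RunningBits + 7` (a round was entered with `CrntShiftState < RunningBits` and added 8). -/
structure LZLoop (mem : Mem) (pv : Nat) : Prop where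
  /-- [LZ1] -/
  bpp : GifFilePrivateType.BitsPerPixel mem pv ≤ 8
  /-- [LZ2] -/
  clear : GifFilePrivateType.ClearCode mem pv ≤ 256
  eof : GifFilePrivateType.EOFCode mem pv = GifFilePrivateType.ClearCode mem pv + 1
  /-- [LZ3] -/
  code_lo : GifFilePrivateType.ClearCode mem pv + 2 ≤ GifFilePrivateType.RunningCode mem pv
  code_hi : GifFilePrivateType.RunningCode mem pv ≤ 4097
  /-- [LZ4] -/
  bits_lo : GifFilePrivateType.BitsPerPixel mem pv + 1 ≤ GifFilePrivateType.RunningBits mem pv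
  bits_hi : GifFilePrivateType.RunningBits mem pv ≤ 12
  /-- [LZ5] -/
  sp : GifFilePrivateType.StackPtr mem pv ≤ 4095
  /-- [LZ6], the loop's form -/
  shift : GifFilePrivateType.CrntShiftState mem pv ≤ 11 ∨
    GifFilePrivateType.CrntShiftState mem pv ≤ GifFilePrivateType.RunningBits mem pv + 7

/-- `LZOK` is the loop's form with the left disjunct (the loop's entry). -/
theorem LZLoop.of_ok {mem : Mem} {pv : Nat} (h : LZOK mem pv) : LZLoop mem pv :=
  ⟨h.bpp, h.clear, h.eof, h.code_lo, h.code_hi, h.bits_lo, h.bits_hi, h.sp, Or.inl h.shift⟩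

/-- The loop's form with `CrntShiftState ≤ 11` is `LZOK` (the error exit of a round; after the subtraction of segment 3). -/
theorem LZLoop.to_ok {mem : Mem} {pv : Nat} (h : LZLoop mem pv) (hs : GifFilePrivateType.CrntShiftState mem pv ≤ 11) :
    LZOK mem pv :=
  ⟨h.bpp, h.clear, h.eof, h.code_lo, h.code_hi, h.bits_lo, h.bits_hi, h.sp, hs⟩

/-- **IN THE BODY of `DGifDecompressInput`**, at the address `cut`, inside the call that was entered at the state `e` (return address
`ret`) with the function's precondition: what holds at EVERY cut between the prologue and the `ret`. -/
structure Body (cut : Word) (H : Heap) (rest : List Obj) (frames : List (Nat × FrameLayout)) (F : Forest) (R : Rd) (u₀ e : State)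
    (ret : Word) (v : State) : Prop where
  /-- the function was entered at `e` … -/
  entry : AtEntry (conv u₀) Gif.L.DGifDecompressInput.entry (DGifDecompressInput.spec H rest frames F R).frame ret e
  /-- … with its precondition -/
  pre : (DGifDecompressInput.spec H rest frames F R).pre e
  rip : v.rip = cut
  /-- six pushes and `sub rsp, 72` -/
  rsp : v.reg .rsp = e.reg .rsp - 120
  /-- `mov r13, rdi` (1067AEH): `gif` -/
  r13 : v.reg .r13 = e.reg .rdi
  /-- `mov r15, rsi` (1067B1H): `Code` -/
  r15 : v.reg .r15 = e.reg .rsi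
  /-- `mov r14, rsp ; shr r14, 3` (1067B4H, 1067D1H): the shadow index of the frame; the epilogue's store uses it -/
  r14 : v.reg .r14 = (e.reg .rsp - 120) >>> 3
  /-- the saved registers, in push order (all six callee-saved registers are pushed): the pops 106883H … 10688BH restore them -/
  slot_r15 : v.mem.readLE (e.reg .rsp - 8) 8 = (e.reg .r15).toNat
  slot_r14 : v.mem.readLE (e.reg .rsp - 16) 8 = (e.reg .r14).toNat
  slot_r13 : v.mem.readLE (e.reg .rsp - 24) 8 = (e.reg .r13).toNat
  slot_r12 : v.mem.readLE (e.reg .rsp - 32) 8 = (e.reg .r12).toNat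
  slot_rbp : v.mem.readLE (e.reg .rsp - 40) 8 = (e.reg .rbp).toNat
  slot_rbx : v.mem.readLE (e.reg .rsp - 48) 8 = (e.reg .rbx).toNat
  /-- the return-address slot `[RA, RA + 8)` still holds `ret` (no store of the function or of a callee goes there): the `ret`
  at 10688DH pops it -/
  slot_ra : UInt64.ofNat (v.mem.readLE (e.reg .rsp) 8) = ret
  /-- the heap's invariant with the OWN frame pushed, the clean stack ending at the present stack pointer -/
  inv : HeapInv H rest (framesIn frames e) ((e.reg .rsp).toNat - 120) v.mem
  /-- the state invariant, same heap, same forest (its `shape.consts.masks` is what segment 3 bounds `*Code` with) -/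
  ok : GifOK H F R v.mem
  /-- the reader did not go back -/
  rem : rem R v.mem ≤ rem R e.mem
  /-- nothing was written but the function's stack, the frame's 8 shadow bytes and the contract's windows -/
  same : Mem.SameExcept
    [⟨(e.reg .rsp).toNat - 352, (e.reg .rsp).toNat⟩,
     shadowSpan ((e.reg .rsp).toNat - 120) ((e.reg .rsp).toNat - 56),
     ⟨F.pv + 20, F.pv + 32⟩,
     ⟨F.pv + 44, F.pv + 56⟩,
     ⟨F.pv + 88, F.pv + 344⟩,
     ⟨(e.reg .rsi).toNat, (e.reg .rsi).toNat + 4⟩,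
     ⟨F.gif + 96, F.gif + 100⟩,
     ⟨R.cur, R.cur + 8⟩] e.mem v.mem
  code : (conv u₀).code.In v.mem
  abi : (conv u₀).inv v

/-- **AFTER THE PROLOGUE** (at 1067EBH, `lea rdi, [rdi + 0x70]`: l.1073 `Private = GifFile->Private`): `Body`; `rdi` still holds
`gif`; the LZW fields, `Buf[0]` and the cursor are as at the entry: `LZOK`, and the measure is the entry's. -/
structure AfterP (H : Heap) (rest : List Obj) (frames : List (Nat × FrameLayout)) (F : Forest) (R : Rd) (u₀ e : State)
    (ret : Word) (v : State) : Prop where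
  body : Body Gif.L.DGifDecompressInput.at_1067eb H rest frames F R u₀ e ret v
  /-- the argument register is untouched -/
  rdi : v.reg .rdi = e.reg .rdi
  /-- the LZW field ranges -/
  lz : LZOK v.mem F.pv
  /-- the function's measure did not grow -/
  mu_le : mu R v.mem F.pv ≤ mu R e.mem F.pv

/-- **AT THE HEAD OF THE FILL LOOP l.1083** (at 106807H, `lea rdi, [rbx + 0x2c]`), with the round measure `m`: `Body`; `rbx =
Private`; the loop's form of the LZW field ranges; `RunningBits − CrntShiftState = m` (truncated: `m = 0` is the exit to segment 3);
the function's measure `mu` is not above the entry's. -/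
structure Head (m : Nat) (H : Heap) (rest : List Obj) (frames : List (Nat × FrameLayout)) (F : Forest) (R : Rd) (u₀ e : State)
    (ret : Word) (v : State) : Prop where
  body : Body Gif.L.DGifDecompressInput.at_106807 H rest frames F R u₀ e ret v
  /-- `rbx = Private` (1067F4H) -/
  rbx : (v.reg .rbx).toNat = F.pv
  /-- the LZW field ranges, the loop's form -/
  lz : LZLoop v.mem F.pv
  /-- THE MEASURE of the loop -/
  measure : GifFilePrivateType.RunningBits v.mem F.pv - GifFilePrivateType.CrntShiftState v.mem F.pv = m
  /-- the function's measure did not grow -/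
  mu_le : mu R v.mem F.pv ≤ mu R e.mem F.pv

/-- **AFTER THE FILL LOOP** (at 10688EH, `lea rdi, [rbx + 0x30]`: l.1093 `*Code = CrntShiftDWord & CodeMasks[RunningBits]`): `Body`;
`rbx = Private`; `ebp = RunningBits` (loaded at 106810H for the loop's test; 10689BH sign-extends it to the index); the test
failed: `RunningBits ≤ CrntShiftState`; the loop's form of the LZW field ranges; the function's measure is not above the entry's. -/
structure Tail (H : Heap) (rest : List Obj) (frames : List (Nat × FrameLayout)) (F : Forest) (R : Rd) (u₀ e : State)
    (ret : Word) (v : State) : Prop where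
  body : Body Gif.L.DGifDecompressInput.at_10688e H rest frames F R u₀ e ret v
  /-- `rbx = Private` -/
  rbx : (v.reg .rbx).toNat = F.pv
  /-- `rbp = Private->RunningBits` (`mov ebp, …` zero-extends) -/
  rbp : (v.reg .rbp).toNat = GifFilePrivateType.RunningBits v.mem F.pv
  /-- the LZW field ranges, the loop's form -/
  lz : LZLoop v.mem F.pv
  /-- the loop's test failed -/
  full : GifFilePrivateType.RunningBits v.mem F.pv ≤ GifFilePrivateType.CrntShiftState v.mem F.pv
  /-- the function's measure did not grow -/
  mu_le : mu R v.mem F.pv ≤ mu R e.mem F.pv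

/-- **BEFORE THE EPILOGUE** (at 106874H, the store that clears the frame's shadow): `Body`, the result in `eax`, and the contract's
postcondition stated of the present memory (the epilogue clears 8 shadow bytes and pops: neither changes what these clauses read). -/
structure Done (H : Heap) (rest : List Obj) (frames : List (Nat × FrameLayout)) (F : Forest) (R : Rd) (u₀ e : State)
    (ret : Word) (v : State) : Prop where
  body : Body Gif.L.DGifDecompressInput.at_106874 H rest frames F R u₀ e ret v
  /-- GIF_OK or GIF_ERROR (`mov eax, imm32`, or DGifBufferedInput's 0) -/
  res : IsBool v
  /-- the LZW field ranges hold again, for both results -/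
  lz : LZOK v.mem F.pv
  /-- GIF_OK: the code is a 12-bit value, and the measure went down -/
  ok1 : (v.reg .rax).toNat = 1 →
    rd v.mem (e.reg .rsi).toNat 4 ≤ 4095 ∧ mu R v.mem F.pv + 1 ≤ mu R e.mem F.pv

/-- **Segment P** (the prologue, 1067A0H … 1067EBH, 16 instructions): six pushes, `sub rsp, 72`, `r13 = gif`, `r15 = Code`, the frame's
three header words, the shadow index in `r14`, the two poison stores. -/
def SegP (Lay : Layout) (μ : Microarch) (u₀ : State) : Prop :=
  ∀ (H : Heap) (rest : List Obj) (frames : List (Nat × FrameLayout)) (F : Forest) (R : Rd) (e : State) (ret : Word),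
    AtEntry (conv u₀) Gif.L.DGifDecompressInput.entry (DGifDecompressInput.spec H rest frames F R).frame ret e →
    (DGifDecompressInput.spec H rest frames F R).pre e →
    ReachVia Lay μ WayInv e (AfterP H rest frames F R u₀ e ret)

/-- **Segment 1** (1067EBH … 106807H, with the error arm 10685EH … 106874H; 11 instructions): the checked load of `GifFile->Private`
(l.1073), the checked load of `RunningBits` and the test l.1078 `RunningBits > LZ_BITS` (it cannot fire: `LZOK.bits_hi`; its arm
stores `gif.Error`, `eax = 0`, to the epilogue); to the loop's head with SOME measure. -/
def Seg1 (Lay : Layout) (μ : Microarch) (u₀ : State) : Prop :=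
  ∀ (H : Heap) (rest : List Obj) (frames : List (Nat × FrameLayout)) (F : Forest) (R : Rd) (e : State) (ret : Word) (v : State),
    AfterP H rest frames F R u₀ e ret v →
    ReachVia Lay μ WayInv v (fun w =>
      (∃ m, Head m H rest frames F R u₀ e ret w) ∨ Done H rest frames F R u₀ e ret w)

/-- **Segment 2** (one round of the fill loop, 106807H … 10685EH, 24 instructions): the checked load of `CrntShiftState`, the test
l.1083; `CrntShiftState ≥ RunningBits` (signed; both are small): to segment 3; else `DGifBufferedInput(gif, Private->Buf,
&NextByte)` (l.1085; `NextByte` is the frame's object: `BufOK` by `Loose.stack`, `HeapWin.offHeap`); 0: to the epilogue with `eax =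
0` (`LZOK` again: the round was entered with `CrntShiftState < RunningBits ≤ 12`, and DGifBufferedInput's footprint misses
`[pv + 8, pv + 48)`: `LZOK.frame`); 1: `CrntShiftDWord |= NextByte << CrntShiftState`, `CrntShiftState += 8` (l.1089-1091), back to
the head with a SMALLER measure; `mu` did not grow (`rem + Buf[0]` went down by at least 1, `CrntShiftState` up by 8). -/
def Seg2 (Lay : Layout) (μ : Microarch) (u₀ : State) : Prop :=
  ∀ (H : Heap) (rest : List Obj) (frames : List (Nat × FrameLayout)) (F : Forest) (R : Rd) (e : State) (ret : Word) (m : Nat)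
    (v : State),
    Head m H rest frames F R u₀ e ret v →
    ReachVia Lay μ WayInv v (fun w =>
      (∃ m', m' < m ∧ Head m' H rest frames F R u₀ e ret w) ∨
      Tail H rest frames F R u₀ e ret w ∨
      Done H rest frames F R u₀ e ret w)

/-- **Segment 3** (10688EH … 10693DH, 45 instructions, no contract call): l.1093 the checked 2-byte load of `CodeMasks[RunningBits]`
from the registered global `Gif.Globals.CodeMasks.obj ∈ rest` (`Ctx.masks`; index `RunningBits ≤ 12`: `LZLoop.bits_hi`; value
`2 ^ RunningBits − 1 ≤ 4095`: `Consts.masks`), the checked store of `*Code`; l.1095-1096 `CrntShiftDWord >>= RunningBits`,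
`CrntShiftState −= RunningBits` (it lowers `mu` by `RunningBits ≥ 1`: `LZLoop.bits_lo`; the result is at most 11); l.1103-1107
`RunningCode` (only below 4097) and `MaxCode1`, `RunningBits` (only below 12) advance: `LZOK` again; `eax = 1`. -/
def Seg3 (Lay : Layout) (μ : Microarch) (u₀ : State) : Prop :=
  ∀ (H : Heap) (rest : List Obj) (frames : List (Nat × FrameLayout)) (F : Forest) (R : Rd) (e : State) (ret : Word) (v : State),
    Tail H rest frames F R u₀ e ret v →
    ReachVia Lay μ WayInv v (Done H rest frames F R u₀ e ret)

/-- **Segment E** (the epilogue, 106874H … ret, 9 instructions): the 8-byte store that clears the frame's shadow, `add rsp, 72`, six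
pops, `ret`. -/
def SegE (Lay : Layout) (μ : Microarch) (u₀ : State) : Prop :=
  ∀ (H : Heap) (rest : List Obj) (frames : List (Nat × FrameLayout)) (F : Forest) (R : Rd) (e : State) (ret : Word) (v : State),
    Done H rest frames F R u₀ e ret v →
    ReachVia Lay μ WayInv v (Returned (conv u₀) (DGifDecompressInput.spec H rest frames F R) e ret)

/-- **The fill loop from its head**, by strong induction on the round measure: to segment 3's entry or to the epilogue's. -/
theorem loop_runs {Lay : Layout} {μ : Microarch} {u₀ : State} (h2 : Seg2 Lay μ u₀)
    (H : Heap) (rest : List Obj) (frames : List (Nat × FrameLayout)) (F : Forest) (R : Rd) (e : State) (ret : Word) :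
    ∀ (m : Nat) (v : State), Head m H rest frames F R u₀ e ret v →
      ReachVia Lay μ WayInv v (fun w => Tail H rest frames F R u₀ e ret w ∨ Done H rest frames F R u₀ e ret w) := by
  intro m
  induction m using Nat.strongRecOn with
  | _ m ih =>
    intro v hv
    refine (h2 H rest frames F R e ret m v hv).trans ?_
    intro w hw
    rcases hw with ⟨m', hlt, hhead⟩ | htail | hdone
    · exact ih m' hlt w hhead
    · exact ReachVia.done (Or.inl htail)
    · exact ReachVia.done (Or.inr hdone)

/-- **The composition of `DGifDecompressInput`**: the prologue, segment 1, the fill loop (an induction on its measure), segment 3,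
the epilogue chain into the function's contract. -/
theorem compose {Lay : Layout} {μ : Microarch} {u₀ : State} (hP : SegP Lay μ u₀) (h1 : Seg1 Lay μ u₀) (h2 : Seg2 Lay μ u₀)
    (h3 : Seg3 Lay μ u₀) (hE : SegE Lay μ u₀) :
    ∀ (H : Heap) (rest : List Obj) (frames : List (Nat × FrameLayout)) (F : Forest) (R : Rd),
      Calls Lay μ WayInv (conv u₀) Gif.L.DGifDecompressInput.entry (DGifDecompressInput.spec H rest frames F R) := by
  intro H rest frames F R e ret he hp
  refine (hP H rest frames F R e ret he hp).trans ?_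
  intro v hv
  refine (h1 H rest frames F R e ret v hv).trans ?_
  intro w hw
  rcases hw with ⟨m, hhead⟩ | hdone
  · refine (loop_runs h2 H rest frames F R e ret m w hhead).trans ?_
    intro x hx
    rcases hx with htail | hdone
    · refine (h3 H rest frames F R e ret x htail).trans ?_
      intro y hy
      exact hE H rest frames F R e ret y hy
    · exact hE H rest frames F R e ret x hdone
  · exact hE H rest frames F R e ret w hdone

end DGifDecompressInput

end Gif.Spec
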